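-- pv_equiv track=rewrite | github.com/jaganadhg/backtobasics | leetcode/match-dictr.py | find_matching_values_bow
-- ===== SOURCE A (Python) =====
-- dict1 = {
--     'a': 'The quick brown fox jumps over the lazy dog',
--     'b': 'Hello world',
--     'c': 'Python is great'
-- }
--
-- dict2 = {
--     'x': 'Python is great',
--     'y': 'The quick brown fox jumps over the lazy dog',
--     'z': 'The book is great'
-- }
--
-- def bag_of_words(sentence):
--     return set(sentence.lower().split())
--
-- def find_matching_values_bow(dict1, dict2):
--     result = {}
--     for key1, value1 in dict1.items():
--         bow1 = bag_of_words(value1)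
--         for key2, value2 in dict2.items():
--             bow2 = bag_of_words(value2)
--             if bow1 == bow2:
--                 result[(key1, key2)] = value1
--     return result
-- ===== SOURCE B (Python) =====
-- def find_matching_values_bow(dict1, dict2):
--     def signature(sentence):
--         # canonical form of the bag of words: sorted distinct lowercased words
--         return tuple(sorted(set(sentence.lower().split())))
--     index = {}
--     for key2, value2 in dict2.items():
--         index.setdefault(signature(value2), []).append(key2)
--     result = {}
--     for key1, value1 in dict1.items():
--         for key2 in index.get(signature(value1), []):
--             result[(key1, key2)] = value1
--     return result
-- ===== Notes on version B (the rewrite author's own statement) =====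
-- stated objective: faster
-- what changed: Instead of recomputing dict2's bag of words inside a nested scan for every dict1 entry, B canonicalises each bag once (sorted distinct words), groups dict2 keys in a hash index by that signature, and answers each dict1 entry with a single lookup.
import Mathlib
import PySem

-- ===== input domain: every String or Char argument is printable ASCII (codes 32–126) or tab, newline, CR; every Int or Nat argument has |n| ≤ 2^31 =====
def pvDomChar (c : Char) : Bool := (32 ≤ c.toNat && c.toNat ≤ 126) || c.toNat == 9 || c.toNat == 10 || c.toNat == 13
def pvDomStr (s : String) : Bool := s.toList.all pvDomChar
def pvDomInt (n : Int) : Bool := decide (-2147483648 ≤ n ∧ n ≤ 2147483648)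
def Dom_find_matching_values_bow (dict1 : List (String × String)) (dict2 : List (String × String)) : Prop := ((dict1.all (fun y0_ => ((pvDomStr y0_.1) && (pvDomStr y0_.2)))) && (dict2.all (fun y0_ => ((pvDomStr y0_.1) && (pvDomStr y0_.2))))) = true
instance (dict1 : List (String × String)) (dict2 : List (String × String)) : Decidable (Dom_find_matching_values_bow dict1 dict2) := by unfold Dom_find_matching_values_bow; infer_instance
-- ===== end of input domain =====

-- B replaces A's nested rescan of dict2 by a one-pass index of dict2 keys grouped by a
-- canonical bag-of-words signature, answered by a single lookup per dict1 entry.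

-- ===== PORT A =====
-- bag_of_words(sentence) = set(sentence.lower().split())
def pvBagOfWords (sentence : String) : PySem.Set String :=
  PySem.Set.ofList (PySem.Str.split₀ (PySem.Str.lower sentence))

def find_matching_values_bow (dict1 : List (String × String)) (dict2 : List (String × String)) : List (String × String × String) :=
  let result : PySem.Dict (String × String) String :=
    dict1.foldl (fun res p =>
      let bow1 := pvBagOfWords p.2
      dict2.foldl (fun res q =>
        let bow2 := pvBagOfWords q.2
        if PySem.Set.equal bow1 bow2 then res.insert (p.1, q.1) p.2 else res) res)
      PySem.Dict.empty
  result.items.map (fun t => (t.1.1, t.1.2, t.2))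

-- ===== PORT B =====
-- signature(sentence) = tuple(sorted(set(sentence.lower().split())))
def pvSignature (sentence : String) : List String :=
  PySem.List.sorted (PySem.Set.ofList (PySem.Str.split₀ (PySem.Str.lower sentence))) (fun x => x) false

def find_matching_values_bow_alt (dict1 : List (String × String)) (dict2 : List (String × String)) : List (String × String × String) :=
  let index : PySem.Dict (List String) (List String) :=
    dict2.foldl (fun d q => d.modify (pvSignature q.2) [] (fun l => l ++ [q.1])) PySem.Dict.empty
  let result : PySem.Dict (String × String) String :=
    dict1.foldl (fun res p =>
      (index.getD (pvSignature p.2) []).foldl (fun res k2 => res.insert (p.1, k2) p.2) res)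
      PySem.Dict.empty
  result.items.map (fun t => (t.1.1, t.1.2, t.2))

-- ===== PRECONDITION & SPEC =====
def Spec_find_matching_values_bow (dict1 : List (String × String)) (dict2 : List (String × String)) (out : List (String × String × String)) : Prop := out = find_matching_values_bow_alt dict1 dict2
instance (dict1 : List (String × String)) (dict2 : List (String × String)) (out : List (String × String × String)) : Decidable (Spec_find_matching_values_bow dict1 dict2 out) := by unfold Spec_find_matching_values_bow; infer_instance

-- ===== CLAIM (what is proved, stated in full; the proofs are below) =====
def Claim_equal_find_matching_values_bow : Prop := ∀ (dict1 : List (String × String)) (dict2 : List (String × String)), Dom_find_matching_values_bow dict1 dict2 → Spec_find_matching_values_bow dict1 dict2 (find_matching_values_bow dict1 dict2)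

-- ===== LEMMAS AND PROOFS =====

-- Python's set equality of the two bags coincides with equality of the canonical signatures.
theorem pv_equal_eq_sig (a b : String) :
    PySem.Set.equal (pvBagOfWords a) (pvBagOfWords b) = (pvSignature b == pvSignature a) := by
  have h : PySem.Set.equal (pvBagOfWords a) (pvBagOfWords b) = true ↔ pvSignature b = pvSignature a := by
    rw [PySem.Set.equal_iff]
    unfold pvSignature pvBagOfWords
    rw [PySem.List.sorted_id_eq_sorted_id_iff_perm]
    rw [List.perm_ext_iff_of_nodup (PySem.Set.nodup_ofList _) (PySem.Set.nodup_ofList _)]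
    constructor
    · intro h x; exact (h x).symm
    · intro h x; exact (h x).symm
  rw [Bool.eq_iff_iff, h, beq_iff_eq]

-- B's index lookup returns exactly the dict2 keys whose signature matches, in order.
theorem pv_index_getD (dict2 : List (String × String)) (b : List String) :
    (dict2.foldl (fun d q => d.modify (pvSignature q.2) [] (fun l => l ++ [q.1]))
        (PySem.Dict.empty : PySem.Dict (List String) (List String))).getD b []
      = (dict2.filter (fun q => pvSignature q.2 == b)).map (·.1) := by
  have h1 : dict2.foldl (fun d q => d.modify (pvSignature q.2) [] (fun l => l ++ [q.1]))
        (PySem.Dict.empty : PySem.Dict (List String) (List String))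
      = (dict2.map (fun q => (pvSignature q.2, q.1))).foldl
          (fun d p => d.modify p.1 [] (fun l => l ++ [p.2])) PySem.Dict.empty := by
    rw [List.foldl_map]
  rw [h1, PySem.Dict.getD_foldl_modify_append]
  simp [List.filter_map, List.map_map, Function.comp_def]

-- Folding with an if-guard is folding over the filtered list.
theorem pv_foldl_if_filter {α β : Type} (p : α → Bool) (f : β → α → β) (l : List α) (init : β) :
    l.foldl (fun s x => if p x then f s x else s) init = (l.filter p).foldl f init := by
  induction l generalizing init with
  | nil => rfl
  | cons a t ih => cases hp : p a <;> simp [hp, ih]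

-- A's guarded scan over dict2 equals B's fold over the index lookup, for any accumulator.
theorem pv_inner (dict2 : List (String × String)) (p : String × String)
    (res : PySem.Dict (String × String) String) :
    dict2.foldl (fun res q =>
        if PySem.Set.equal (pvBagOfWords p.2) (pvBagOfWords q.2) then res.insert (p.1, q.1) p.2 else res) res
      = ((dict2.foldl (fun d q => d.modify (pvSignature q.2) [] (fun l => l ++ [q.1]))
            (PySem.Dict.empty : PySem.Dict (List String) (List String))).getD (pvSignature p.2) []).foldl
          (fun res k2 => res.insert (p.1, k2) p.2) res := by
  rw [pv_index_getD, List.foldl_map, ← pv_foldl_if_filter]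
  apply PySem.List.foldl_congr_mem
  intro acc x _; rw [pv_equal_eq_sig]

-- ===== VERDICT (by name: the statement is the Claim_ definition above) =====
theorem find_matching_values_bow_spec : Claim_equal_find_matching_values_bow := by
  intro dict1 dict2 _
  unfold Spec_find_matching_values_bow find_matching_values_bow find_matching_values_bow_alt
  simp only []
  congr 1
  refine congrArg _ ?_
  apply PySem.List.foldl_congr_mem
  intro acc x _; exact pv_inner dict2 x acc
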